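-- pv_equiv track=rewrite | github.com/chihyanghsu0805/computer-science | algorithms/number_theory.py | nCrModp
-- ===== SOURCE A (Python) =====
-- def nCrModp(n: int, r: int, p: int) -> int:
--     """Compute nCrModp.
--
--     Args:
--         n (int): n.
--         r (int): r.
--         p (int): p.
--
--     Returns:
--         int: result.
--     """
--     if r > n - r:
--         r = n - r
--     C = [0 for i in range(r + 1)]
--     C[0] = 1
--
--     for i in range(1, n + 1):
--         for j in range(min(i, r), 0, -1):
--             C[j] = (C[j] + C[j - 1]) % p
--
--     return C[r]
-- ===== SOURCE B (Python) =====
-- def nCrModp(n: int, r: int, p: int) -> int: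
--     """Compute nCrModp via the multiplicative formula (exact product, one final mod)."""
--     r = min(r, n - r)
--     if r < 0:
--         raise ValueError("nCr(n, r) requires 0 <= r <= n")
--     num = 1
--     for k in range(1, r + 1):
--         num = num * (n - r + k) // k
--     return num % p
-- ===== Notes on version B (the rewrite author's own statement) =====
-- stated objective: faster
-- what changed: Replaces the O(n*r) Pascal-triangle DP table with the O(r) multiplicative formula: an exact integer prefix product num = num*(n-r+k)//k (always an exact division) followed by one final % p.
-- intended difference: When r = 0 or r = n and p = 1 or p < 0, A returns the literal 1 (its loop never applies % p), while B returns 1 % p (0 for p = 1, 1 + p for p < 0), which is the intended reduced residue modulo p. — e.g. on nCrModp(3, 0, 1): A returns 1, B returns 0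
-- outside the precondition, e.g. on nCrModp(5, 0, 0): A returns 1, B raises ZeroDivisionError
import Mathlib
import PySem

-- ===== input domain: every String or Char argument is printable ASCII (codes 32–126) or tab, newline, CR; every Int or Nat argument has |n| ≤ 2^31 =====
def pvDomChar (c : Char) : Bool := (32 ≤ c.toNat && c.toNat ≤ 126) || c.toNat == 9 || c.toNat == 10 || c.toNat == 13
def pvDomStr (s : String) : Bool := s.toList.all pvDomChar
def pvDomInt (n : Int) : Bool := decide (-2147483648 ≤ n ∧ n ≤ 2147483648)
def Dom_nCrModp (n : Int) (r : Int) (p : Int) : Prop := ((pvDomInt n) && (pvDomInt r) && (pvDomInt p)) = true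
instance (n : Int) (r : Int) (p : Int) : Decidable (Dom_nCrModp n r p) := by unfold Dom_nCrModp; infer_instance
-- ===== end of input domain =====

-- B replaces A's O(n*r) Pascal-triangle DP table with the O(r) exact multiplicative
-- formula (prefix product with exact division, one final % p).


-- ===== PORT A =====
def nCrModp (n : Int) (r : Int) (p : Int) : Int :=
  let r := if r > n - r then n - r else r
  let C : List Int := (PySem.List.pyRange 0 (r + 1) 1).map (fun _ => (0 : Int))
  let C := PySem.List.pySetD C 0 1
  let C := (PySem.List.pyRange 1 (n + 1) 1).foldl
    (fun C i =>
      (PySem.List.pyRange (min i r) 0 (-1)).foldl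
        (fun C j => PySem.List.pySetD C j
          (PySem.Int.mod (PySem.List.pyGetD C j 0 + PySem.List.pyGetD C (j - 1) 0) p)) C) C
  PySem.List.pyGetD C r 0

-- ===== PORT B =====
def nCrModp_alt (n : Int) (r : Int) (p : Int) : Int :=
  let r := min r (n - r)
  if r < 0 then 0  -- Python B raises ValueError here; these inputs lie outside Pre_
  else
    let num := (PySem.List.pyRange 1 (r + 1) 1).foldl
      (fun num k => PySem.Int.floordiv (num * (n - r + k)) k) 1
    PySem.Int.mod num p

-- ===== PRECONDITION & SPEC =====
-- Pre_ excludes p = 0 (A's inner '% p' raises ZeroDivisionError as soon as the loop body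
-- runs; A returns with p = 0 only in the degenerate r ∈ {0, n} cases, where B's final
-- '% p' raises) and r < 0 or r > n (A's table then has non-positive length, so C[0] = 1
-- raises IndexError).
def Pre_nCrModp (n : Int) (r : Int) (p : Int) : Prop := 0 ≤ r ∧ r ≤ n ∧ p ≠ 0
instance (n : Int) (r : Int) (p : Int) : Decidable (Pre_nCrModp n r p) := by unfold Pre_nCrModp; infer_instance
def pvWitness_nCrModp : Int × Int × Int := (5, 2, 3)

-- When r = 0 or r = n and p = 1 or p < 0, A returns the literal 1 (its loop never
-- applies % p), while B returns 1 % p (0 for p = 1, 1 + p for p < 0), the intended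
-- reduced residue modulo p.
def D_nCrModp (n : Int) (r : Int) (p : Int) : Prop := (r = 0 ∨ r = n) ∧ (p = 1 ∨ p < 0)
instance (n : Int) (r : Int) (p : Int) : Decidable (D_nCrModp n r p) := by unfold D_nCrModp; infer_instance

def Spec_nCrModp (n : Int) (r : Int) (p : Int) (out : Int) : Prop := ¬ D_nCrModp n r p → out = nCrModp_alt n r p
instance (n : Int) (r : Int) (p : Int) (out : Int) : Decidable (Spec_nCrModp n r p out) := by unfold Spec_nCrModp; infer_instance

def pvDiffWitness_nCrModp : Int × Int × Int := (3, 0, 1)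
def pvDiffWitnessOut_nCrModp : Int × Int := (1, 0)

-- ===== CLAIM (what is proved, stated in full; the proofs are below) =====
def Claim_unchanged_nCrModp : Prop := ∀ (n : Int) (r : Int) (p : Int), Dom_nCrModp n r p → Pre_nCrModp n r p → Spec_nCrModp n r p (nCrModp n r p)
def Claim_changed_nCrModp : Prop := Dom_nCrModp (pvDiffWitness_nCrModp.1) (pvDiffWitness_nCrModp.2.1) (pvDiffWitness_nCrModp.2.2) ∧ Pre_nCrModp (pvDiffWitness_nCrModp.1) (pvDiffWitness_nCrModp.2.1) (pvDiffWitness_nCrModp.2.2) ∧ D_nCrModp (pvDiffWitness_nCrModp.1) (pvDiffWitness_nCrModp.2.1) (pvDiffWitness_nCrModp.2.2) ∧ nCrModp (pvDiffWitness_nCrModp.1) (pvDiffWitness_nCrModp.2.1) (pvDiffWitness_nCrModp.2.2) = pvDiffWitnessOut_nCrModp.1 ∧ nCrModp_alt (pvDiffWitness_nCrModp.1) (pvDiffWitness_nCrModp.2.1) (pvDiffWitness_nCrModp.2.2) = pvDiffWitnessOut_nCrModp.2 ∧ pvDiffWitnessOut_nCrModp.1 ≠ pvDiffWitnessOut_n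CrModp.2
def Claim_exact_nCrModp : Prop := ∀ (n : Int) (r : Int) (p : Int), Dom_nCrModp n r p → Pre_nCrModp n r p → D_nCrModp n r p → nCrModp n r p ≠ nCrModp_alt n r p

-- ===== LEMMAS AND PROOFS =====

-- fmod absorbs an fmod on either summand
theorem pv_fmod_add_left (a b p : Int) : (Int.fmod a p + b).fmod p = (a + b).fmod p := by
  rw [Int.fmod_def a p, sub_add_eq_add_sub, Int.sub_mul_fmod_self_left]

theorem pv_fmod_add_right (a b p : Int) : (a + Int.fmod b p).fmod p = (a + b).fmod p := by
  rw [add_comm a, pv_fmod_add_left, add_comm]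

-- B's loop computes the exact binomial coefficient C(M+k, k)
theorem pvB_fold (M : Nat) (k : Nat) :
    (PySem.List.pyRange 1 ((k : Int) + 1) 1).foldl
      (fun num j => PySem.Int.floordiv (num * ((M : Int) + j)) j) 1
      = ((M + k).choose k : Int) := by
  induction k with
  | zero =>
    have h0 : ((0:Nat):Int) + 1 = 1 := by norm_num
    rw [h0, PySem.List.pyRange_one_eq_nil le_rfl]
    simp
  | succ k ih =>
    have h1 : (((k+1 : Nat)) : Int) + 1 = ((k:Int)+1) + 1 := by push_cast; ring
    rw [h1, PySem.List.pyRange_one_succ_right (by omega : (1:Int) ≤ (k:Int)+1),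
        List.foldl_append, ih]
    simp only [List.foldl]
    have h : (M+k+1) * (M+k).choose k = (M+k+1).choose (k+1) * (k+1) := by
      simpa [Nat.succ_eq_add_one] using Nat.add_one_mul_choose_eq (M+k) k
    have hm : ((M + k).choose k : Int) * ((M:Int) + ((k:Int)+1)) = (((M + (k+1))).choose (k+1) : Int) * ((k:Int)+1) := by
      calc ((M + k).choose k : Int) * ((M:Int) + ((k:Int)+1))
          = (((M+k+1) * (M+k).choose k : Nat) : Int) := by push_cast; ring
        _ = (((M+k+1).choose (k+1) * (k+1) : Nat) : Int) := by rw [h]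
        _ = (((M + (k+1))).choose (k+1) : Int) * ((k:Int)+1) := by push_cast; ring_nf
    rw [hm]
    show Int.fdiv _ _ = _
    rw [Int.mul_fdiv_cancel _ (by omega : ((k:Int)+1) ≠ 0)]

-- A's inner loop: one in-place Pascal update, characterised pointwise
theorem pvA_inner (p : Int) (C : List Int) (m : Nat) (hm : m < C.length) :
    ((PySem.List.pyRange (m : Int) 0 (-1)).foldl
      (fun C j => PySem.List.pySetD C j
        (PySem.Int.mod (PySem.List.pyGetD C j 0 + PySem.List.pyGetD C (j - 1) 0) p)) C).length
      = C.length
    ∧ ∀ j : Nat,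
      ((PySem.List.pyRange (m : Int) 0 (-1)).foldl
        (fun C j => PySem.List.pySetD C j
          (PySem.Int.mod (PySem.List.pyGetD C j 0 + PySem.List.pyGetD C (j - 1) 0) p)) C).getD j 0
        = if 1 ≤ j ∧ j ≤ m then Int.fmod (C.getD j 0 + C.getD (j - 1) 0) p else C.getD j 0 := by
  induction m generalizing C with
  | zero =>
    rw [Nat.cast_zero, PySem.List.pyRange_neg_one_eq_nil le_rfl]
    exact ⟨rfl, fun j => by rw [List.foldl_nil, if_neg (by omega)]⟩
  | succ m ih =>
    have hcons : PySem.List.pyRange ((m+1 : Nat) : Int) 0 (-1)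
        = ((m+1 : Nat) : Int) :: PySem.List.pyRange ((m : Nat) : Int) 0 (-1) := by
      rw [PySem.List.pyRange_neg_one_cons (by push_cast; omega),
         show ((m+1:Nat):Int) - 1 = ((m:Nat):Int) by push_cast; ring]
    rw [hcons, List.foldl_cons]
    set v := PySem.Int.mod (PySem.List.pyGetD C ((m+1:Nat):Int) 0 + PySem.List.pyGetD C (((m+1:Nat):Int) - 1) 0) p with hv
    have hstep : PySem.List.pySetD C ((m+1:Nat):Int) v = C.set (m+1) v :=
      PySem.List.pySetD_natCast C (m+1) v
    rw [hstep]
    have hlen : (C.set (m+1) v).length = C.length := List.length_set ..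
    obtain ⟨ihlen, ihget⟩ := ih (C.set (m+1) v) (by omega)
    refine ⟨by rw [ihlen, hlen], fun j => ?_⟩
    have hC' : ∀ i : Nat, (C.set (m+1) v).getD i 0 = if m+1 = i then v else C.getD i 0 := by
      intro i
      rw [List.getD_eq_getElem?_getD, List.getElem?_set]
      by_cases h : m+1 = i
      · rw [if_pos h, if_pos h, if_pos (by omega)]; rfl
      · rw [if_neg h, if_neg h, List.getD_eq_getElem?_getD]
    have hveq : v = Int.fmod (C.getD (m+1) 0 + C.getD m 0) p := by
      have h1 : (((m+1:Nat):Int) - 1) = ((m:Nat):Int) := by push_cast; ring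
      rw [hv, h1, PySem.List.pyGetD_natCast C (m+1) 0, PySem.List.pyGetD_natCast C m 0]
      rfl
    rw [ihget j]
    by_cases hj1 : 1 ≤ j ∧ j ≤ m
    · rw [if_pos hj1, hC' j, if_neg (by omega), hC' (j-1), if_neg (by omega),
         if_pos (by omega : 1 ≤ j ∧ j ≤ m+1)]
    · by_cases hj2 : j = m+1
      · subst hj2
        rw [if_neg hj1, hC' (m+1), if_pos rfl, hveq, if_pos (by omega : 1 ≤ m+1 ∧ m+1 ≤ m+1),
           Nat.add_sub_cancel]
      · rw [if_neg hj1, hC' j, if_neg (by omega), if_neg (by omega : ¬ (1 ≤ j ∧ j ≤ m+1))]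

-- A's outer loop: after i rows the table holds C(i, j) % p (and the untouched 1 at index 0)
theorem pvA_outer (p : Int) (R i : Nat) (C0 : List Int)
    (hlen : C0.length = R + 1) (h00 : C0.getD 0 0 = 1)
    (hj0 : ∀ j : Nat, 1 ≤ j → j ≤ R → C0.getD j 0 = Int.fmod ((Nat.choose 0 j : Nat) : Int) p) :
    ((PySem.List.pyRange 1 ((i : Int) + 1) 1).foldl
        (fun C i => (PySem.List.pyRange (min i (R : Int)) 0 (-1)).foldl
          (fun C j => PySem.List.pySetD C j
            (PySem.Int.mod (PySem.List.pyGetD C j 0 + PySem.List.pyGetD C (j - 1) 0) p)) C)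
        C0).length = R + 1
    ∧ ((PySem.List.pyRange 1 ((i : Int) + 1) 1).foldl
        (fun C i => (PySem.List.pyRange (min i (R : Int)) 0 (-1)).foldl
          (fun C j => PySem.List.pySetD C j
            (PySem.Int.mod (PySem.List.pyGetD C j 0 + PySem.List.pyGetD C (j - 1) 0) p)) C)
        C0).getD 0 0 = 1
    ∧ ∀ j : Nat, 1 ≤ j → j ≤ R →
      ((PySem.List.pyRange 1 ((i : Int) + 1) 1).foldl
        (fun C i => (PySem.List.pyRange (min i (R : Int)) 0 (-1)).foldl
          (fun C j => PySem.List.pySetD C j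
            (PySem.Int.mod (PySem.List.pyGetD C j 0 + PySem.List.pyGetD C (j - 1) 0) p)) C)
        C0).getD j 0 = Int.fmod ((Nat.choose i j : Nat) : Int) p := by
  induction i with
  | zero =>
    rw [Nat.cast_zero, zero_add, PySem.List.pyRange_one_eq_nil le_rfl]
    exact ⟨hlen, h00, hj0⟩
  | succ i ih =>
    obtain ⟨ilen, i00, ijq⟩ := ih
    rw [show ((i+1:Nat):Int) + 1 = ((i:Int)+1) + 1 by push_cast; ring,
        PySem.List.pyRange_one_succ_right (by omega : (1:Int) ≤ (i:Int)+1),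
        List.foldl_append, List.foldl_cons, List.foldl_nil]
    set T := (PySem.List.pyRange 1 ((i : Int) + 1) 1).foldl
        (fun C i => (PySem.List.pyRange (min i (R : Int)) 0 (-1)).foldl
          (fun C j => PySem.List.pySetD C j
            (PySem.Int.mod (PySem.List.pyGetD C j 0 + PySem.List.pyGetD C (j - 1) 0) p)) C)
        C0 with hT
    have hmin : min ((i:Int)+1) (R:Int) = ((min (i+1) R : Nat) : Int) := by push_cast; omega
    rw [hmin]
    obtain ⟨klen, kget⟩ := pvA_inner p T (min (i+1) R) (by rw [ilen]; omega)
    refine ⟨by rw [klen, ilen], ?_, ?_⟩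
    · rw [kget 0, if_neg (by omega), i00]
    · intro j hj1 hjR
      rw [kget j]
      by_cases hcase : j ≤ min (i+1) R
      · rw [if_pos ⟨hj1, hcase⟩, ijq j hj1 hjR]
        have hpas : Nat.choose (i+1) j = Nat.choose i j + Nat.choose i (j-1) := by
          have := Nat.choose_succ_succ i (j-1)
          simp only [Nat.succ_eq_add_one] at this
          rw [show j - 1 + 1 = j by omega] at this
          omega
        by_cases hj2 : j = 1
        · subst hj2
          rw [i00, pv_fmod_add_left]
          congr 1
          rw [hpas]
          push_cast
          simp
        · rw [ijq (j-1) (by omega) (by omega), pv_fmod_add_left, pv_fmod_add_right]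
          congr 1
          rw [hpas]
          push_cast
          ring
      · rw [if_neg (by omega), ijq j hj1 hjR]
        have c1 : Nat.choose i j = 0 := Nat.choose_eq_zero_of_lt (by omega)
        have c2 : Nat.choose (i+1) j = 0 := Nat.choose_eq_zero_of_lt (by omega)
        rw [c1, c2]

-- the value A computes
theorem pvA_val (n r p : Int) (h0 : 0 ≤ r) (h1 : r ≤ n) :
    nCrModp n r p = if min r (n - r) = 0 then 1
      else Int.fmod ((n.toNat.choose (min r (n - r)).toNat : Nat) : Int) p := by
  simp only [nCrModp]
  rw [show (if r > n - r then n - r else r) = min r (n - r) by omega]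
  set R := (min r (n - r)).toNat with hR
  have hcast : ((R : Nat) : Int) = min r (n - r) := Int.toNat_of_nonneg (by omega)
  conv_lhs => rw [← hcast, show n + 1 = ((n.toNat : Nat) : Int) + 1 by omega]
  set Z := (PySem.List.pyRange 0 ((R : Int) + 1) 1).map (fun _ => (0 : Int)) with hZ
  have hzero : ∀ j : Nat, Z.getD j 0 = 0 := by
    intro j
    rw [hZ, List.getD_eq_getElem?_getD, List.getElem?_map]
    cases (PySem.List.pyRange 0 ((R : Int) + 1) 1)[j]? <;> rfl
  have hlen0 : Z.length = R + 1 := by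
    rw [hZ, List.length_map, PySem.List.length_pyRange_one]; omega
  have hC0set : PySem.List.pySetD Z (0 : Int) 1 = Z.set 0 1 := PySem.List.pySetD_natCast Z 0 1
  rw [hC0set]
  have hC0get : ∀ i : Nat, (Z.set 0 1).getD i 0 = if i = 0 then 1 else 0 := by
    intro i
    rw [List.getD_eq_getElem?_getD, List.getElem?_set]
    by_cases h : i = 0
    · rw [if_pos h.symm, if_pos (by omega), if_pos h]; rfl
    · rw [if_neg (fun hh => h hh.symm), if_neg h, ← List.getD_eq_getElem?_getD, hzero]
  obtain ⟨tlen, t00, tj⟩ := pvA_outer p R n.toNat (Z.set 0 1)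
    (by rw [List.length_set, hlen0])
    (by rw [hC0get 0]; rfl)
    (by intro j hj1 _
        rw [hC0get j, if_neg (by omega), Nat.choose_eq_zero_of_lt (by omega)]
        rfl)
  rw [PySem.List.pyGetD_natCast]
  by_cases hR0 : R = 0
  · rw [if_pos (show min r (n - r) = 0 by omega)]
    rw [hR0] at t00 ⊢
    exact t00
  · rw [if_neg (show ¬ min r (n - r) = 0 by omega), tj R (by omega) le_rfl]

-- the value B computes
theorem pvB_val (n r p : Int) (h0 : 0 ≤ r) (h1 : r ≤ n) :
    nCrModp_alt n r p = Int.fmod ((n.toNat.choose (min r (n - r)).toNat : Nat) : Int) p := by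
  simp only [nCrModp_alt]
  rw [if_neg (by omega : ¬ min r (n - r) < 0)]
  set R := (min r (n - r)).toNat with hR
  have hcast : ((R : Nat) : Int) = min r (n - r) := Int.toNat_of_nonneg (by omega)
  have hMcast : (((n - min r (n - r)).toNat : Nat) : Int) = n - min r (n - r) :=
    Int.toNat_of_nonneg (by omega)
  conv_lhs => rw [← hMcast, ← hcast]
  rw [pvB_fold]
  have hsum : (n - ((R : Nat) : Int)).toNat + R = n.toNat := by omega
  rw [hsum]
  rfl

-- ===== VERDICT (by name: the statement is the Claim_ definition above) =====
theorem nCrModp_spec : Claim_unchanged_nCrModp := by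
  intro n r p _ hpre hnd
  obtain ⟨h0, h1, hp⟩ := hpre
  show nCrModp n r p = nCrModp_alt n r p
  rw [pvA_val n r p h0 h1, pvB_val n r p h0 h1]
  by_cases hm : min r (n - r) = 0
  · rw [if_pos hm, show (min r (n - r)).toNat = 0 by omega, Nat.choose_zero_right, Nat.cast_one]
    have hr0 : r = 0 ∨ r = n := by omega
    have hnp : ¬ (p = 1 ∨ p < 0) := fun h => hnd ⟨hr0, h⟩
    have hp2 : 2 ≤ p := by omega
    have h2 : Int.fmod 1 p = 1 % p := PySem.Int.mod_eq_emod_of_pos (by omega)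
    rw [h2, Int.emod_eq_of_lt (by norm_num) (by omega)]
  · rw [if_neg hm]

theorem nCrModp_changed : Claim_changed_nCrModp := by
  unfold Claim_changed_nCrModp; decide

theorem nCrModp_tight : Claim_exact_nCrModp := by
  intro n r p _ hpre hd
  obtain ⟨h0, h1, hp⟩ := hpre
  obtain ⟨hd1, hd2⟩ := hd
  have hm : min r (n - r) = 0 := by omega
  rw [pvA_val n r p h0 h1, pvB_val n r p h0 h1, if_pos hm,
      show (min r (n - r)).toNat = 0 by omega, Nat.choose_zero_right, Nat.cast_one]
  rcases hd2 with h | h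
  · subst h; decide
  · have hb := (PySem.Int.mod_neg_bounds (a := 1) h).2
    have : PySem.Int.mod 1 p = Int.fmod 1 p := rfl
    omega
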